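-- pv_equiv track=rewrite | github.com/artemmilov/NPD-QUAST | metrics.py | _abstract_medal_score
-- ===== SOURCE A (Python) =====
-- def _abstract_medal_score(true_answers, tool_answers, medals):
--     score = 0
--     for scan, true_inchi in true_answers.items():
--         sorted_tool_answers = sorted(
--             tool_answers[scan],
--             key=lambda ans: ans[1],
--         )
--         sorted_inches = tuple(
--             map(
--                 lambda ans: ans[0],
--                 sorted_tool_answers,
--             )
--         )
--         if true_inchi in sorted_inches:
--             pos = sorted_inches.index(true_inchi)
--             if pos < len(medals):
--                 score += medals[pos]
--     return score
-- ===== SOURCE B (Python) =====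
-- def _abstract_medal_score(true_answers, tool_answers, medals):
--     score = 0
--     for scan, true_inchi in true_answers.items():
--         entries = tool_answers[scan]
--         best_key = None
--         best_idx = -1
--         for j, (name, key) in enumerate(entries):
--             if name == true_inchi and (best_key is None or key < best_key):
--                 best_key = key
--                 best_idx = j
--         if best_key is not None:
--             pos = sum(1 for _, k in entries if k < best_key) \
--                 + sum(1 for _, k in entries[:best_idx] if k == best_key)
--             if pos < len(medals):
--                 score += medals[pos]
--     return score
-- ===== Notes on version B (the rewrite author's own statement) =====
-- stated objective: alternative
-- what changed: B drops the per-scan sort-then-index: one linear pass finds the matching answer with the minimal key (first occurrence), and its stable-sort position is obtained by counting entries with strictly smaller keys plus equal-key entries occurring earlier, so no sorted copy is ever built; asymptotically O(S*m) vs O(S*m log m), but not measurably faster in CPython where the sort runs in C.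
import Mathlib
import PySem

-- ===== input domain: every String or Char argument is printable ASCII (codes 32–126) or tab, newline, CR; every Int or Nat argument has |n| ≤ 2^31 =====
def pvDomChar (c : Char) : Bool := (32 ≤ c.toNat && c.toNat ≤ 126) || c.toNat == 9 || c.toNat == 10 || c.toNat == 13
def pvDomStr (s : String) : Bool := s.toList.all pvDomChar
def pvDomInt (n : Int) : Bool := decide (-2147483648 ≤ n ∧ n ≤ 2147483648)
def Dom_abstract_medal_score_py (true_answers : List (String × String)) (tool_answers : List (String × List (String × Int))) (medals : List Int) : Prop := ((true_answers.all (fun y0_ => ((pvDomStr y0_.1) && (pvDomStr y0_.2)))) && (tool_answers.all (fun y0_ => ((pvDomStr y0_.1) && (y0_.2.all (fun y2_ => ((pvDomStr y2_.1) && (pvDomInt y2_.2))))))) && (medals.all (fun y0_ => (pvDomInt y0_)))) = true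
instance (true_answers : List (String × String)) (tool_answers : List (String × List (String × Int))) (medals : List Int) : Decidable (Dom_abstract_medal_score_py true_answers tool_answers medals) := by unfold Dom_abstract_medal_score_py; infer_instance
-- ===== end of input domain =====

-- B replaces A's per-scan sort-then-index by a single counting pass that computes the stable-sort
-- position of the best matching answer directly (same return value on all inputs admitted by Pre_).

-- ===== PORT A =====
-- tool_answers[scan]: first-match lookup; under Pre_ the key exists and keys are unique, so this is
-- exactly Python's dict lookup ([] is only returned outside Pre_, where Python raises KeyError).
def pvLookup (tool_answers : List (String × List (String × Int))) (scan : String) : List (String × Int) :=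
  ((tool_answers.find? (fun p => p.1 == scan)).map (fun p => p.2)).getD []

-- the body of A's outer loop for one (scan, true_inchi) pair
def pvContribA (entries : List (String × Int)) (true_inchi : String) (medals : List Int) : Int :=
  let sorted_tool_answers := PySem.List.sorted entries (fun ans => ans.2)
  let sorted_inches := sorted_tool_answers.map (fun ans => ans.1)
  match PySem.List.index? sorted_inches true_inchi with
  | none => 0
  | some pos => if (pos : Int) < (medals.length : Int) then (PySem.List.pyGet? medals (pos : Int)).getD 0 else 0

def abstract_medal_score_py (true_answers : List (String × String)) (tool_answers : List (String × List (String × Int))) (medals : List Int) : Int :=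
  true_answers.foldl (fun score p => score + pvContribA (pvLookup tool_answers p.1) p.2 medals) 0

-- ===== PORT B =====
-- one step of Source B's inner loop: keep the (key, index) of the first minimal-key matching answer
def pvStep (true_inchi : String) (best : Option (Int × Int)) (je : Int × (String × Int)) : Option (Int × Int) :=
  match best with
  | none => if je.2.1 = true_inchi then some (je.2.2, je.1) else none
  | some b => if je.2.1 = true_inchi ∧ je.2.2 < b.1 then some (je.2.2, je.1) else some b

def pvBest (entries : List (String × Int)) (true_inchi : String) : Option (Int × Int) :=
  (PySem.List.enumerate entries).foldl (pvStep true_inchi) none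

-- the body of B's outer loop for one (scan, true_inchi) pair
def pvContribB (entries : List (String × Int)) (true_inchi : String) (medals : List Int) : Int :=
  match pvBest entries true_inchi with
  | none => 0
  | some bk =>
    let pos : Nat := entries.countP (fun a => decide (a.2 < bk.1)) +
      (PySem.List.slice entries (some 0) (some bk.2)).countP (fun a => decide (a.2 = bk.1))
    if (pos : Int) < (medals.length : Int) then (PySem.List.pyGet? medals (pos : Int)).getD 0 else 0

def abstract_medal_score_py_alt (true_answers : List (String × String)) (tool_answers : List (String × List (String × Int))) (medals : List Int) : Int :=
  true_answers.foldl (fun score p => score + pvContribB (pvLookup tool_answers p.1) p.2 medals) 0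

-- ===== PRECONDITION & SPEC =====
-- Pre_ excludes (i) inputs where a scan of true_answers is missing from tool_answers — there Python A
-- (and B) raises KeyError — and (ii) association lists with duplicate keys, which do not represent any
-- Python dict (dict keys are unique, so such lists never reach A).
def Pre_abstract_medal_score_py (true_answers : List (String × String)) (tool_answers : List (String × List (String × Int))) (medals : List Int) : Prop :=
  (true_answers.map Prod.fst).Nodup ∧ (tool_answers.map Prod.fst).Nodup ∧
  ∀ p ∈ true_answers, p.1 ∈ tool_answers.map Prod.fst
instance (true_answers : List (String × String)) (tool_answers : List (String × List (String × Int))) (medals : List Int) : Decidable (Pre_abstract_medal_score_py true_answers tool_answers medals) := by unfold Pre_abstract_medal_score_py; infer_instance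

def pvWitness_abstract_medal_score_py : (List (String × String)) × (List (String × List (String × Int))) × List Int :=
  ([("s1", "x")], [("s1", [("y", 3), ("x", 1)])], [5, 3, 1])

def Spec_abstract_medal_score_py (true_answers : List (String × String)) (tool_answers : List (String × List (String × Int))) (medals : List Int) (out : Int) : Prop := out = abstract_medal_score_py_alt true_answers tool_answers medals
instance (true_answers : List (String × String)) (tool_answers : List (String × List (String × Int))) (medals : List Int) (out : Int) : Decidable (Spec_abstract_medal_score_py true_answers tool_answers medals out) := by unfold Spec_abstract_medal_score_py; infer_instance

-- ===== CLAIM (what is proved, stated in full; the proofs are below) =====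
def Claim_equal_abstract_medal_score_py : Prop := ∀ (true_answers : List (String × String)) (tool_answers : List (String × List (String × Int))) (medals : List Int), Dom_abstract_medal_score_py true_answers tool_answers medals → Pre_abstract_medal_score_py true_answers tool_answers medals → Spec_abstract_medal_score_py true_answers tool_answers medals (abstract_medal_score_py true_answers tool_answers medals)

-- ===== LEMMAS AND PROOFS =====

-- filtering the stable insertion of x into a key-sorted list appends x exactly when its key matches
lemma pv_filter_insertBy (x : String × Int) (ys : List (String × Int)) (k : Int)
    (h : ys.Pairwise (fun a b => a.2 ≤ b.2)) :
    (PySem.List.insertBy (fun a b => decide (a.2 < b.2)) x ys).filter (fun a => decide (a.2 = k)) =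
      ys.filter (fun a => decide (a.2 = k)) ++ (if x.2 = k then [x] else []) := by
  induction ys with
  | nil =>
    by_cases hk : x.2 = k <;> simp [PySem.List.insertBy, List.filter, hk]
  | cons y ys ih =>
    have hy : ∀ b ∈ ys, y.2 ≤ b.2 := (List.pairwise_cons.mp h).1
    have htail := (List.pairwise_cons.mp h).2
    by_cases hlt : x.2 < y.2
    · have h1 : PySem.List.insertBy (fun a b => decide (a.2 < b.2)) x (y :: ys) = x :: y :: ys := by
        simp [PySem.List.insertBy, hlt]
      rw [h1]
      by_cases hk : x.2 = k
      · have hnil : (y :: ys).filter (fun a => decide (a.2 = k)) = [] := by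
          rw [List.filter_eq_nil_iff]
          intro a ha
          rcases List.mem_cons.mp ha with rfl | ha'
          · simp; omega
          · have := hy a ha'; simp; omega
        rw [List.filter_cons_of_pos (by simp [hk]), hnil]
        simp [hk]
      · rw [List.filter_cons_of_neg (by simp [hk])]
        simp [hk]
    · have h1 : PySem.List.insertBy (fun a b => decide (a.2 < b.2)) x (y :: ys) =
          y :: PySem.List.insertBy (fun a b => decide (a.2 < b.2)) x ys := by
        simp [PySem.List.insertBy, hlt]
      rw [h1]
      by_cases hyk : y.2 = k
      · rw [List.filter_cons_of_pos (by simp [hyk]), List.filter_cons_of_pos (by simp [hyk]),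
          ih htail, List.cons_append]
      · rw [List.filter_cons_of_neg (by simp [hyk]), List.filter_cons_of_neg (by simp [hyk]),
          ih htail]

-- stability of PySem's sort: the equal-key sublist is the original equal-key sublist
lemma pv_sorted_filter_eq (entries : List (String × Int)) (k : Int) :
    (PySem.List.sorted entries (fun a => a.2)).filter (fun a => decide (a.2 = k)) =
      entries.filter (fun a => decide (a.2 = k)) := by
  induction entries using List.reverseRecOn with
  | nil => simp [PySem.List.sorted_eq_foldl_insertBy]
  | append_singleton xs x ih =>
    have hstep : PySem.List.sorted (xs ++ [x]) (fun a => a.2) =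
        PySem.List.insertBy (fun a b => decide (a.2 < b.2)) x (PySem.List.sorted xs (fun a => a.2)) := by
      rw [PySem.List.sorted_eq_foldl_insertBy, PySem.List.sorted_eq_foldl_insertBy, List.foldl_append]
      rfl
    rw [hstep, pv_filter_insertBy x _ k (PySem.List.sorted_pairwise xs (fun a => a.2)), ih,
      List.filter_append]
    by_cases hk : x.2 = k <;> simp [List.filter, hk]

-- a key-sorted list splits into the below-k, equal-k and above-k blocks, in that order
lemma pv_sorted_decomp (l : List (String × Int)) (k : Int) (h : l.Pairwise (fun a b => a.2 ≤ b.2)) :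
    l = l.filter (fun a => decide (a.2 < k)) ++ l.filter (fun a => decide (a.2 = k)) ++
        l.filter (fun a => decide (k < a.2)) := by
  induction l with
  | nil => simp
  | cons y ys ih =>
    have hy : ∀ b ∈ ys, y.2 ≤ b.2 := (List.pairwise_cons.mp h).1
    have hys := ih (List.pairwise_cons.mp h).2
    rcases lt_trichotomy y.2 k with hc | hc | hc
    · rw [List.filter_cons_of_pos (by simp [hc]), List.filter_cons_of_neg (by simp; omega),
        List.filter_cons_of_neg (by simp; omega), List.cons_append, List.cons_append]
      exact congrArg (y :: ·) hys
    · have hnil : ys.filter (fun a => decide (a.2 < k)) = [] := by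
        rw [List.filter_eq_nil_iff]; intro a ha; have := hy a ha; simp; omega
      rw [List.filter_cons_of_neg (by simp; omega), List.filter_cons_of_pos (by simp [hc]),
        List.filter_cons_of_neg (by simp; omega), hnil]
      rw [hnil] at hys
      simp only [List.nil_append, List.cons_append] at hys ⊢
      exact congrArg (y :: ·) hys
    · have hnil1 : ys.filter (fun a => decide (a.2 < k)) = [] := by
        rw [List.filter_eq_nil_iff]; intro a ha; have := hy a ha; simp; omega
      have hnil2 : ys.filter (fun a => decide (a.2 = k)) = [] := by
        rw [List.filter_eq_nil_iff]; intro a ha; have := hy a ha; simp; omega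
      rw [List.filter_cons_of_neg (by simp; omega), List.filter_cons_of_neg (by simp; omega),
        List.filter_cons_of_pos (by simp [hc]), hnil1, hnil2]
      rw [hnil1, hnil2] at hys
      simp only [List.nil_append] at hys ⊢
      exact congrArg (y :: ·) hys

-- index? through a prefix that does not contain the value
lemma pv_index?_append {α : Type} [BEq α] [LawfulBEq α] (l₁ l₂ : List α) (v : α) (h : v ∉ l₁) :
    PySem.List.index? (l₁ ++ l₂) v = (PySem.List.index? l₂ v).map (· + l₁.length) := by
  induction l₁ with
  | nil => simp
  | cons x xs ih =>
    have hx : x ≠ v := by intro hxv; exact h (hxv ▸ List.mem_cons_self)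
    have hnot : v ∉ xs := fun hm => h (List.mem_cons_of_mem _ hm)
    rw [List.cons_append, PySem.List.index?_cons_of_ne _ hx, ih hnot, Option.map_map]
    cases PySem.List.index? l₂ v <;> simp

-- what pvBest returns: nothing matches, or the first minimal-key match with all its properties
def pvBestSpec (entries : List (String × Int)) (t : String) : Option (Int × Int) → Prop
  | none => ∀ a ∈ entries, a.1 ≠ t
  | some bk => ∃ n : Nat, bk.2 = (n : Int) ∧ ∃ hn : n < entries.length,
      entries[n].1 = t ∧ entries[n].2 = bk.1 ∧
      (∀ a ∈ entries, a.1 = t → bk.1 ≤ a.2) ∧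
      (∀ j, (hj : j < entries.length) → j < n → entries[j].1 = t → bk.1 < entries[j].2)

lemma pvBest_append (xs : List (String × Int)) (x : String × Int) (t : String) :
    pvBest (xs ++ [x]) t = pvStep t (pvBest xs t) ((xs.length : Int), x) := by
  unfold pvBest
  rw [PySem.List.enumerate_append, List.foldl_append]
  simp [PySem.List.enumerate_cons, PySem.List.enumerate_nil]

lemma pvBest_spec (entries : List (String × Int)) (t : String) :
    pvBestSpec entries t (pvBest entries t) := by
  induction entries using List.reverseRecOn with
  | nil =>
    have h0 : pvBest [] t = none := by simp [pvBest, PySem.List.enumerate_nil]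
    rw [h0]; intro a ha; simp at ha
  | append_singleton xs x ih =>
    rw [pvBest_append]
    cases hb : pvBest xs t with
    | none =>
      rw [hb] at ih
      by_cases hx : x.1 = t
      · simp only [pvStep, hx, if_pos rfl]
        refine ⟨xs.length, rfl, ?_, ?_, ?_, ?_, ?_⟩
        · simp
        · simp [hx]
        · simp
        · intro a ha hat
          rcases List.mem_append.mp ha with ha' | ha'
          · exact absurd hat (ih a ha')
          · have hax : a = x := by simpa using ha'
            rw [hax]
        · intro j hj hjn hjt
          have hjx : j < xs.length := hjn
          rw [List.getElem_append_left hjx] at hjt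
          exact absurd hjt (ih _ (List.getElem_mem hjx))
      · have hstep : pvStep t none ((xs.length : Int), x) = none := by simp [pvStep, hx]
        rw [hstep]
        intro a ha
        rcases List.mem_append.mp ha with ha' | ha'
        · exact ih a ha'
        · have hax : a = x := by simpa using ha'
          rw [hax]; exact hx
    | some bk =>
      rw [hb] at ih
      obtain ⟨n, hn2, hn, h1, h2, hmin, hfirst⟩ := ih
      by_cases hx : x.1 = t ∧ x.2 < bk.1
      · simp only [pvStep, if_pos hx]
        refine ⟨xs.length, rfl, ?_, ?_, ?_, ?_, ?_⟩
        · simp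
        · simp [hx.1]
        · simp
        · intro a ha hat
          rcases List.mem_append.mp ha with ha' | ha'
          · exact le_trans (le_of_lt hx.2) (hmin a ha' hat)
          · have hax : a = x := by simpa using ha'
            rw [hax]
        · intro j hj hjn hjt
          have hjx : j < xs.length := hjn
          rw [List.getElem_append_left hjx] at hjt ⊢
          exact lt_of_lt_of_le hx.2 (hmin _ (List.getElem_mem hjx) hjt)
      · simp only [pvStep, if_neg hx]
        have hnx : n < (xs ++ [x]).length := by simp; omega
        refine ⟨n, hn2, hnx, ?_, ?_, ?_, ?_⟩
        · rw [List.getElem_append_left hn]; exact h1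
        · rw [List.getElem_append_left hn]; exact h2
        · intro a ha hat
          rcases List.mem_append.mp ha with ha' | ha'
          · exact hmin a ha' hat
          · have hax : a = x := by simpa using ha'
            rw [hax] at hat ⊢
            by_cases hxlt : x.2 < bk.1
            · exact absurd ⟨hat, hxlt⟩ hx
            · omega
        · intro j hj hjn hjt
          have hjx : j < xs.length := lt_of_lt_of_le hjn (le_of_lt hn)
          rw [List.getElem_append_left hjx] at hjt ⊢
          exact hfirst j hjx hjn hjt

-- the per-scan contributions of the two ports agree
lemma pv_contrib_eq (entries : List (String × Int)) (t : String) (medals : List Int) :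
    pvContribA entries t medals = pvContribB entries t medals := by
  have hs := pvBest_spec entries t
  cases hb : pvBest entries t with
  | none =>
    rw [hb] at hs
    have hnone : PySem.List.index?
        ((PySem.List.sorted entries (fun ans => ans.2)).map (fun ans => ans.1)) t = none := by
      rw [PySem.List.index?_eq_none_iff]
      intro hmem
      obtain ⟨a, ha, hat⟩ := List.mem_map.mp hmem
      exact hs a ((PySem.List.mem_sorted _ _ _ _).mp ha) hat
    simp only [pvContribA, pvContribB, hb, hnone]
  | some bk =>
    rw [hb] at hs
    obtain ⟨n, hn2, hn, h1, h2, hmin, hfirst⟩ := hs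
    have hperm : (PySem.List.sorted entries (fun ans => ans.2)).Perm entries :=
      PySem.List.sorted_perm entries (fun ans => ans.2) false
    have hdecomp := pv_sorted_decomp (PySem.List.sorted entries (fun ans => ans.2)) bk.1
      (PySem.List.sorted_pairwise entries (fun ans => ans.2))
    have hQ := pv_sorted_filter_eq entries bk.1
    -- entries split at index n
    have hentries : entries = entries.take n ++ entries[n] :: entries.drop (n + 1) := by
      conv_lhs => rw [← List.take_append_drop n entries]
      rw [List.drop_eq_getElem_cons hn]
    -- no equal-key entry before position n matches t
    have hfilter_take : ∀ a ∈ (entries.take n).filter (fun a => decide (a.2 = bk.1)), a.1 ≠ t := by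
      intro a ha hat
      have ha1 := List.mem_filter.mp ha
      obtain ⟨j, hjlt, hjeq⟩ := List.mem_iff_getElem.mp ha1.1
      have hjn : j < n := by
        have hlen := hjlt
        simp [List.length_take] at hlen
        omega
      have hjlen : j < entries.length := lt_trans hjn hn
      have hg : (entries.take n)[j] = entries[j] := List.getElem_take
      rw [hg] at hjeq
      have hstrict := hfirst j hjlen hjn (hjeq ▸ hat)
      have hsnd : entries[j].2 = a.2 := by rw [hjeq]
      have hak : a.2 = bk.1 := by simpa using ha1.2
      omega
    have hQsplit : entries.filter (fun a => decide (a.2 = bk.1)) =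
        (entries.take n).filter (fun a => decide (a.2 = bk.1)) ++
          entries[n] :: (entries.drop (n + 1)).filter (fun a => decide (a.2 = bk.1)) := by
      conv_lhs => rw [hentries]
      rw [List.filter_append]
      congr 1
      simp [List.filter, h2]
    have hidxQ : PySem.List.index?
        ((entries.filter (fun a => decide (a.2 = bk.1))).map (fun a => a.1)) t =
        some (((entries.take n).filter (fun a => decide (a.2 = bk.1))).length) := by
      rw [hQsplit, List.map_append]
      rw [pv_index?_append _ _ _ (by
        intro hmem
        obtain ⟨a, ha, hat⟩ := List.mem_map.mp hmem
        exact hfilter_take a ha hat)]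
      simp only [List.map_cons, h1]
      rw [PySem.List.index?_cons_self]
      simp
    have hmemQ : t ∈ ((entries.filter (fun a => decide (a.2 = bk.1))).map (fun a => a.1)) :=
      List.mem_map.mpr ⟨entries[n],
        List.mem_filter.mpr ⟨List.getElem_mem hn, by simp [h2]⟩, h1⟩
    -- no below-key element of the sorted list matches t
    have hP : ∀ a ∈ (PySem.List.sorted entries (fun ans => ans.2)).filter
        (fun a => decide (a.2 < bk.1)), a.1 ≠ t := by
      intro a ha hat
      have ha1 := List.mem_filter.mp ha
      have hmem : a ∈ entries := (PySem.List.mem_sorted _ _ _ _).mp ha1.1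
      have hle := hmin a hmem hat
      have hlt : a.2 < bk.1 := by simpa using ha1.2
      omega
    -- the first index of t in the sorted name list
    have hidx : PySem.List.index?
        ((PySem.List.sorted entries (fun ans => ans.2)).map (fun ans => ans.1)) t =
        some (((entries.take n).filter (fun a => decide (a.2 = bk.1))).length +
          ((PySem.List.sorted entries (fun ans => ans.2)).filter
            (fun a => decide (a.2 < bk.1))).length) := by
      conv_lhs => rw [hdecomp]
      rw [List.append_assoc, List.map_append]
      rw [pv_index?_append _ _ _ (by
        intro hmem
        obtain ⟨a, ha, hat⟩ := List.mem_map.mp hmem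
        exact hP a ha hat)]
      rw [List.map_append, hQ, PySem.List.index?_append_of_mem _ hmemQ, hidxQ]
      simp
    -- B's slice is the take-prefix
    have hslice : PySem.List.slice entries (some 0) (some bk.2) = entries.take n := by
      rw [hn2]
      rw [PySem.List.slice_zero_start, PySem.List.slice_to_natCast]
    -- the position counts agree
    have hpos : ((entries.take n).filter (fun a => decide (a.2 = bk.1))).length +
        ((PySem.List.sorted entries (fun ans => ans.2)).filter
          (fun a => decide (a.2 < bk.1))).length =
        entries.countP (fun a => decide (a.2 < bk.1)) +
          (entries.take n).countP (fun a => decide (a.2 = bk.1)) := by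
      rw [List.countP_eq_length_filter, List.countP_eq_length_filter]
      have := hperm.countP_eq (fun a => decide (a.2 < bk.1))
      rw [List.countP_eq_length_filter, List.countP_eq_length_filter] at this
      omega
    simp only [pvContribA, pvContribB, hb, hidx, hslice, hpos]

-- ===== VERDICT (by name: the statement is the Claim_ definition above) =====
theorem abstract_medal_score_py_spec : Claim_equal_abstract_medal_score_py := by
  intro true_answers tool_answers medals hdom hpre
  unfold Spec_abstract_medal_score_py abstract_medal_score_py abstract_medal_score_py_alt
  have hfun : (fun (score : Int) (p : String × String) =>
        score + pvContribA (pvLookup tool_answers p.1) p.2 medals) =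
      (fun (score : Int) (p : String × String) =>
        score + pvContribB (pvLookup tool_answers p.1) p.2 medals) := by
    funext s p
    rw [pv_contrib_eq]
  rw [hfun]
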